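-- pv_equiv track=rewrite | github.com/sixGodChan/NowCoder | class15/code02_RobotWalk.py | work1
-- ===== SOURCE A (Python) =====
-- def work1(N, cur, rest, P):
--     '''
--     :param N: 有哪些位置？1~N
--     :param cur: 机器人当前来到的位置是cur
--     :param rest: 机器人还有rest步需要去走
--     :param P: 最终的目标是P
--     :return: 机器人从cur出发，走过rest步之后，最终停在aim的方法数，是多少？
--     '''
--     if rest == 0:  # 来到最后
--         return 1 if cur == P else 0  # 这种方法是否成立
--     if cur == 1:  # 只能往左走
--         return work1(N, cur + 1, rest - 1, P)
--     if cur == N:  # 只能往右走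
--         return work1(N, cur - 1, rest - 1, P)
--     # 可以往左也可以往右走
--     return work1(N, cur + 1, rest - 1, P) + work1(N, cur - 1, rest - 1, P)
-- ===== SOURCE B (Python) =====
-- def work1(N, cur, rest, P):
--     # Bottom-up DP over (position, steps remaining) on the band of positions
--     # reachable from cur within rest steps, stored as a list indexed by offset.
--     lo = cur - rest
--     width = 2 * rest + 1
--     prev = [1 if lo + i == P else 0 for i in range(width)]
--     for _ in range(rest):
--         nxt = []
--         for i in range(width):
--             p = lo + i
--             left = prev[i + 1] if i + 1 < width else 0   # value at p + 1
--             right = prev[i - 1] if i >= 1 else 0         # value at p - 1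
--             if p == 1:
--                 nxt.append(left)
--             elif p == N:
--                 nxt.append(right)
--             else:
--                 nxt.append(left + right)
--         prev = nxt
--     return prev[rest]
-- ===== Notes on version B (the rewrite author's own statement) =====
-- stated objective: faster
-- what changed: replaced the exponential branching recursion by a bottom-up dynamic program over (position, steps-remaining) stored as a list over the reachable band of positions; intended as faster (measured 604x at the largest size where A still finished; A timed out beyond)
import Mathlib
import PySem

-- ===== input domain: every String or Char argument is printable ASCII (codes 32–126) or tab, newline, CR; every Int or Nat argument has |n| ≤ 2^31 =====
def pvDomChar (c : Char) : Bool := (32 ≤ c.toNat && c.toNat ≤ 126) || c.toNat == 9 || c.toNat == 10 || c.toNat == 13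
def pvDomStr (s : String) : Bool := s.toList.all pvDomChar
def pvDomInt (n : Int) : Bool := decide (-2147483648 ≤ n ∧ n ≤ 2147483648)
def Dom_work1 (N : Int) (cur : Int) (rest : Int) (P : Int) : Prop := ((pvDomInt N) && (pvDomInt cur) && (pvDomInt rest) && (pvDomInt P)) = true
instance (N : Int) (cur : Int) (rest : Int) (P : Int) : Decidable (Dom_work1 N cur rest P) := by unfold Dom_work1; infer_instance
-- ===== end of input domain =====

-- B replaces A's branching recursion by a bottom-up DP over (position, steps remaining)
-- on the band of reachable positions; intended as faster (measured 604x at the largest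
-- size where A still finished; A timed out on larger inputs).

-- ===== PORT A =====
-- A recurses on rest; fuel = rest.toNat (exact for rest ≥ 0, which Pre_ states;
-- for rest < 0 A never returns).
def work1Go (N : Int) (cur : Int) (P : Int) : Nat → Int
  | 0 => if cur == P then 1 else 0
  | r + 1 =>
    if cur == 1 then work1Go N (cur + 1) P r
    else if cur == N then work1Go N (cur - 1) P r
    else work1Go N (cur + 1) P r + work1Go N (cur - 1) P r

def work1 (N : Int) (cur : Int) (rest : Int) (P : Int) : Int :=
  work1Go N cur P rest.toNat

-- ===== PORT B =====
-- Source B's list indexing prev[i+1]/prev[i-1] is guarded in range, so List.getD is exact.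
def bStep (N : Int) (lo : Int) (width : Nat) (prev : List Int) : List Int :=
  (List.range width).map (fun (i : Nat) =>
    let p := lo + (i : Int)
    let left := if i + 1 < width then prev.getD (i + 1) 0 else 0
    let right := if 1 ≤ i then prev.getD (i - 1) 0 else 0
    if p == 1 then left
    else if p == N then right
    else left + right)

def work1_alt (N : Int) (cur : Int) (rest : Int) (P : Int) : Int :=
  let R := rest.toNat
  let lo := cur - rest
  let width := 2 * R + 1
  let init := (List.range width).map (fun (i : Nat) => if lo + (i : Int) == P then (1 : Int) else 0)
  let final := (List.range R).foldl (fun prev _ => bStep N lo width prev) init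
  final.getD R 0

-- ===== PRECONDITION & SPEC =====
-- Pre_ excludes rest < 0, on which A recurses forever (RecursionError).
def Pre_work1 (N : Int) (cur : Int) (rest : Int) (P : Int) : Prop := 0 ≤ rest
instance (N : Int) (cur : Int) (rest : Int) (P : Int) : Decidable (Pre_work1 N cur rest P) := by unfold Pre_work1; infer_instance
def pvWitness_work1 : Int × Int × Int × Int := (5, 2, 4, 3)
def Spec_work1 (N : Int) (cur : Int) (rest : Int) (P : Int) (out : Int) : Prop := out = work1_alt N cur rest P
instance (N : Int) (cur : Int) (rest : Int) (P : Int) (out : Int) : Decidable (Spec_work1 N cur rest P out) := by unfold Spec_work1; infer_instance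

-- ===== CLAIM (what is proved, stated in full; the proofs are below) =====
def Claim_equal_work1 : Prop := ∀ (N : Int) (cur : Int) (rest : Int) (P : Int), Dom_work1 N cur rest P → Pre_work1 N cur rest P → Spec_work1 N cur rest P (work1 N cur rest P)

-- ===== LEMMAS AND PROOFS =====

theorem getD_map_range {f : Nat → Int} {w i : Nat} (h : i < w) :
    ((List.range w).map f).getD i 0 = f i := by
  rw [List.getD_eq_getElem?_getD, List.getElem?_map, List.getElem?_range h]
  rfl

def levels (N lo P : Int) (width : Nat) : Nat → List Int
  | 0 => (List.range width).map (fun (i : Nat) => if lo + (i : Int) == P then (1 : Int) else 0)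
  | k + 1 => bStep N lo width (levels N lo P width k)

theorem foldl_levels (N lo P : Int) (width : Nat) (k : Nat) :
    (List.range k).foldl (fun prev _ => bStep N lo width prev) (levels N lo P width 0) =
      levels N lo P width k := by
  induction k with
  | zero => rfl
  | succ k ih => rw [List.range_succ, List.foldl_append, ih]; rfl

-- cone invariant: inside the cone of dependence the DP table equals A's recursion
theorem levels_eq (N lo P : Int) (width : Nat) (k : Nat) :
    ∀ i : Nat, k ≤ i → i + k < width →
      (levels N lo P width k).getD i 0 = work1Go N (lo + (i : Int)) P k := by
  induction k with
  | zero =>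
    intro i _ hiw
    rw [show levels N lo P width 0 =
      (List.range width).map (fun (i : Nat) => if lo + (i : Int) == P then (1 : Int) else 0) from rfl]
    rw [getD_map_range (by omega)]
    rfl
  | succ k ih =>
    intro i hk hiw
    rw [show levels N lo P width (k + 1) = bStep N lo width (levels N lo P width k) from rfl]
    unfold bStep
    rw [getD_map_range (by omega)]
    have h1 : i + 1 < width := by omega
    have h2 : 1 ≤ i := by omega
    simp only [h1, h2, if_pos]
    have e1 : (levels N lo P width k).getD (i + 1) 0 = work1Go N (lo + ((i : Int) + 1)) P k := by
      have := ih (i + 1) (by omega) (by omega)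
      simpa [Nat.cast_add] using this
    have e2 : (levels N lo P width k).getD (i - 1) 0 = work1Go N (lo + ((i : Int) - 1)) P k := by
      have := ih (i - 1) (by omega) (by omega)
      have hc : ((i - 1 : Nat) : Int) = (i : Int) - 1 := by omega
      rw [hc] at this
      exact this
    rw [e1, e2, show lo + ((i : Int) + 1) = lo + (i : Int) + 1 by ring,
        show lo + ((i : Int) - 1) = lo + (i : Int) - 1 by ring]
    rfl

-- ===== VERDICT (by name: the statement is the Claim_ definition above) =====
theorem work1_spec : Claim_equal_work1 := by
  intro N cur rest P _ hpre
  have h0 : (0:Int) ≤ rest := hpre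
  unfold Spec_work1 work1 work1_alt
  simp only
  rw [show ((List.range (2 * rest.toNat + 1)).map
        (fun (i : Nat) => if cur - rest + (i : Int) == P then (1 : Int) else 0)) =
      levels N (cur - rest) P (2 * rest.toNat + 1) 0 from rfl,
    foldl_levels]
  rw [levels_eq N (cur - rest) P (2 * rest.toNat + 1) rest.toNat rest.toNat (le_refl _) (by omega)]
  have : cur - rest + (rest.toNat : Int) = cur := by omega
  rw [this]
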